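-- pv_equiv track=rewrite | github.com/zhangjunyi111/-python | 对称美学.py | find
-- ===== SOURCE A (Python) =====
-- def find(n, k):
--     if n == 1:
--         return "red"
--     length = 2**(n-1)
--     if k >= length/2:
--         pos = k-length // 2
--         return find(n-1, pos)
--     else:
--         return "blue" if find(n-1, k) == "red" else "red"
-- ===== SOURCE B (Python) =====
-- def find(n, k):
--     flipped = False
--     for m in range(n, 1, -1):
--         length = 2 ** (m - 1)
--         if k >= length / 2:
--             k -= length // 2
--         else:
--             flipped = not flipped
--     return "blue" if flipped else "red"
-- ===== Notes on version B (the rewrite author's own statement) =====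
-- stated objective: simpler
-- what changed: Replaces A's recursion (with a post-recursion colour flip on one branch) by a single iterative for-loop over range(n,1,-1) that carries a boolean flip flag and adjusts k in place.
import Mathlib
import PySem

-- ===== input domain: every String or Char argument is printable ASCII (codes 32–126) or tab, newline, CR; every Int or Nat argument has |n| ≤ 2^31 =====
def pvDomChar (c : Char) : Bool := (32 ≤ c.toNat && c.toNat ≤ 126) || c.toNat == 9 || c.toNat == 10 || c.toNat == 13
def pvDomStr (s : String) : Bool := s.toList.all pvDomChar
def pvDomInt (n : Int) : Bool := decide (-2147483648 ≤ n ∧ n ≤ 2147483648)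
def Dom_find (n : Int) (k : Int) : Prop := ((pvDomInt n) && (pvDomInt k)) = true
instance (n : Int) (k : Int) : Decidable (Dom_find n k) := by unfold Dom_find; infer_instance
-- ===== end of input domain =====

-- B replaces A's recursion by a single for-loop over range(n,1,-1) carrying a boolean flip flag: simpler, no recursion.


-- ===== PORT A =====
-- fuel = recursion depth budget; under Pre_find (1 ≤ n) the initial fuel n.toNat is never exhausted.
-- Python's 'k >= length/2' (float division) is ported as '2*k ≥ length': exact on Pre_find, since
-- length/2 = 2^(n-2) with n ≤ 1025 is a power of two ≤ 2^1023, represented exactly as a float,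
-- and Python's int/float comparison is exact.
def findA : Nat → Int → Int → String
  | 0, _, _ => "red"
  | fuel + 1, n, k =>
    if n = 1 then "red"
    else
      let length : Int := 2 ^ (n - 1).toNat
      if 2 * k ≥ length then
        findA fuel (n - 1) (k - PySem.Int.floordiv length 2)
      else
        if findA fuel (n - 1) k = "red" then "blue" else "red"

def find (n : Int) (k : Int) : String := findA n.toNat n k

-- ===== PORT B =====
-- one fold over range(n, 1, -1) carrying (flipped, k); same float-comparison porting note as in A.
def findStep (st : Bool × Int) (m : Int) : Bool × Int :=
  let length : Int := 2 ^ (m - 1).toNat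
  if 2 * st.2 ≥ length then (st.1, st.2 - PySem.Int.floordiv length 2)
  else (!st.1, st.2)

def find_alt (n : Int) (k : Int) : String :=
  let st := (PySem.List.pyRange n 1 (-1)).foldl findStep (false, k)
  if st.1 then "blue" else "red"

-- ===== PRECONDITION & SPEC =====
-- Pre_find excludes exactly the inputs on which A raises: n ≤ 0 (A recurses forever:
-- RecursionError) and n ≥ 1026 (the float division 2**(n-1)/2 exceeds the largest double
-- 2^1023·(2−2^−52) and Python raises OverflowError before any recursive call).
-- A returns an ordinary value on every input with 1 ≤ n ≤ 1025.
def Pre_find (n : Int) (k : Int) : Prop := 1 ≤ n ∧ n ≤ 1025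
instance (n : Int) (k : Int) : Decidable (Pre_find n k) := by unfold Pre_find; infer_instance
def pvWitness_find : Int × Int := (5, 7)

def Spec_find (n : Int) (k : Int) (out : String) : Prop := out = find_alt n k
instance (n : Int) (k : Int) (out : String) : Decidable (Spec_find n k out) := by unfold Spec_find; infer_instance

-- ===== CLAIM (what is proved, stated in full; the proofs are below) =====
def Claim_equal_find : Prop := ∀ (n : Int) (k : Int), Dom_find n k → Pre_find n k → Spec_find n k (find n k)

-- ===== LEMMAS AND PROOFS =====

-- flipping the initial flag flips the final flag and leaves the k-trace unchanged
theorem findStep_flip (L : List Int) (p : Bool) (k : Int) :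
    L.foldl findStep (!p, k) = ((L.foldl findStep (p, k)).1.not, (L.foldl findStep (p, k)).2) := by
  induction L generalizing p k with
  | nil => simp [List.foldl]
  | cons m L ih =>
    simp only [List.foldl]
    by_cases h : 2 * k ≥ (2 : Int) ^ (m - 1).toNat
    · simp only [findStep, h, if_pos]
      exact ih p _
    · simp only [findStep, h]
      simpa using ih (!p) k

theorem findA_eq_alt (fuel : Nat) (n k : Int) (h1 : 1 ≤ n) (hf : (n - 1).toNat ≤ fuel) :
    findA fuel n k = find_alt n k := by
  induction fuel generalizing n k with
  | zero =>
    have hn : n = 1 := by omega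
    subst hn
    simp [findA, find_alt, PySem.List.pyRange_neg_one_eq_nil (by norm_num : (1:Int) ≤ 1)]
  | succ fuel ih =>
    by_cases hn : n = 1
    · subst hn
      simp [findA, find_alt, PySem.List.pyRange_neg_one_eq_nil (by norm_num : (1:Int) ≤ 1)]
    · have hn2 : 2 ≤ n := by omega
      have hcons := PySem.List.pyRange_neg_one_cons (a := n) (b := 1) (by omega)
      rw [find_alt, hcons]
      simp only [List.foldl]
      by_cases h : 2 * k ≥ (2 : Int) ^ (n - 1).toNat
      · rw [findA]
        simp only [if_neg hn, h, if_pos]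
        rw [ih (n - 1) _ (by omega) (by omega)]
        simp only [findStep, h, if_pos, find_alt]
      · rw [findA]
        simp only [if_neg hn, if_neg (not_le.mpr (lt_of_not_ge h))]
        rw [ih (n - 1) k (by omega) (by omega)]
        simp only [findStep, if_neg (not_le.mpr (lt_of_not_ge h)), find_alt]
        rw [findStep_flip (PySem.List.pyRange (n - 1) 1 (-1)) false k]
        by_cases hres : ((PySem.List.pyRange (n - 1) 1 (-1)).foldl findStep (false, k)).1 = true <;>
          simp [hres]

-- ===== VERDICT (by name: the statement is the Claim_ definition above) =====
theorem find_spec : Claim_equal_find := by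
  intro n k _ hpre
  unfold Spec_find find
  exact findA_eq_alt n.toNat n k hpre.1 (by omega)
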